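-- pv_equiv track=rewrite | github.com/ApartsinProjects/LLMBook | scripts/_archive/_fix_broken_links.py | fix_category4
-- ===== SOURCE A (Python) =====
-- SECTION_RENUM = [
--     ("module-09-inference-optimization/section-8.", "module-09-inference-optimization/section-9."),
--     ("module-10-llm-apis/section-9.", "module-10-llm-apis/section-10."),
--     ("module-11-prompt-engineering/section-10.", "module-11-prompt-engineering/section-11."),
--     ("module-12-hybrid-ml-llm/section-11.", "module-12-hybrid-ml-llm/section-12."),
--     ("module-13-synthetic-data/section-12.", "module-13-synthetic-data/section-13."),
--     ("module-14-fine-tuning-fundamentals/section-13.", "module-14-fine-tuning-fundamentals/section-14."),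
--     ("module-15-peft/section-14.", "module-15-peft/section-15."),
--     ("module-16-distillation-merging/section-15.", "module-16-distillation-merging/section-16."),
--     ("module-17-alignment-rlhf-dpo/section-16.", "module-17-alignment-rlhf-dpo/section-17."),
--     ("module-18-interpretability/section-17.", "module-18-interpretability/section-18."),
--     ("module-19-embeddings-vector-db/section-18.", "module-19-embeddings-vector-db/section-19."),
--     ("module-20-rag/section-19.", "module-20-rag/section-20."),
--     ("module-22-ai-agents/section-21.", "module-22-ai-agents/section-22."),
--     ("module-24-multi-agent-systems/section-23.", "module-24-multi-agent-systems/section-24."),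
--     ("module-29-evaluation-observability/section-25.", "module-29-evaluation-observability/section-29."),
--     ("module-32-safety-ethics-regulation/section-26.", "module-32-safety-ethics-regulation/section-32."),
--     ("module-32-safety-ethics-regulation/section-35.", "module-32-safety-ethics-regulation/section-32."),
-- ]
--
-- def fix_category4(content):
--     count = 0
--     for old, new in SECTION_RENUM:
--         n = content.count(old)
--         if n > 0:
--             content = content.replace(old, new)
--             count += n
--     return content, count
-- ===== SOURCE B (Python) =====
-- # One left-to-right scan instead of 17 sequential count+replace passes; the replacement
-- # table is rebuilt from compact (module-name, old-section, new-section) triples.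
-- _RENUM = [
--     ("09-inference-optimization", "8", "9"),
--     ("10-llm-apis", "9", "10"),
--     ("11-prompt-engineering", "10", "11"),
--     ("12-hybrid-ml-llm", "11", "12"),
--     ("13-synthetic-data", "12", "13"),
--     ("14-fine-tuning-fundamentals", "13", "14"),
--     ("15-peft", "14", "15"),
--     ("16-distillation-merging", "15", "16"),
--     ("17-alignment-rlhf-dpo", "16", "17"),
--     ("18-interpretability", "17", "18"),
--     ("19-embeddings-vector-db", "18", "19"),
--     ("20-rag", "19", "20"),
--     ("22-ai-agents", "21", "22"),
--     ("24-multi-agent-systems", "23", "24"),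
--     ("29-evaluation-observability", "25", "29"),
--     ("32-safety-ethics-regulation", "26", "32"),
--     ("32-safety-ethics-regulation", "35", "32"),
-- ]
--
-- def _pat(m, s):
--     return "module-" + m + "/section-" + s + "."
--
-- def fix_category4(content):
--     table = [(_pat(m, a), _pat(m, b)) for m, a, b in _RENUM]
--     out = []
--     count = 0
--     i = 0
--     n = len(content)
--     while i < n:
--         for old, new in table:
--             if content.startswith(old, i):
--                 out.append(new)
--                 count += 1
--                 i += len(old)
--                 break
--         else:
--             out.append(content[i])
--             i += 1
--     return "".join(out), count
-- ===== Notes on version B (the rewrite author's own statement) =====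
-- stated objective: alternative
-- what changed: Replaces 17 sequential count-then-replace passes over the whole string by one left-to-right scan that at each position tries the table entries (rebuilt from compact (module, old-section, new-section) triples) and splices the replacement in a single traversal; correctness rests on the patterns being pairwise incomparable and inert under each other's replacements.
import Mathlib
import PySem

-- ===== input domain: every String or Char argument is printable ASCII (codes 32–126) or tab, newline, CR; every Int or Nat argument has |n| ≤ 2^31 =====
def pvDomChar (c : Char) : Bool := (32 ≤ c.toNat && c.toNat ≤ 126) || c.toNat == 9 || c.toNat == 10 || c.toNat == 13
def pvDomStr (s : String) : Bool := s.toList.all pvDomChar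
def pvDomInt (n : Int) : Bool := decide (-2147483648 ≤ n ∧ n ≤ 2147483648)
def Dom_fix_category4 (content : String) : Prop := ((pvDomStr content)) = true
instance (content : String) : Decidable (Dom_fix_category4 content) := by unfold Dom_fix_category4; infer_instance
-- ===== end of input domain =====

-- B replaces A's 17 sequential count-then-replace passes by ONE left-to-right scan that tries the
-- table entries at each position; B also rebuilds the table from compact (module, old, new) triples
-- (objective: alternative; equality proved via incomparability and inertness of the fixed patterns).

-- ===== PORT A =====
-- The replacement table. Each entry is the SAME string constant as in the Python source; the
-- literals are written out as their code-point lists (TBL) and wrapped with String.ofList only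
-- because the kernel cannot compute with String.toList on string literals at a usable speed.
def TBL : List (List Char × List Char) := [
  (['m','o','d','u','l','e','-','0','9','-','i','n','f','e','r','e','n','c','e','-','o','p','t','i','m','i','z','a','t','i','o','n','/','s','e','c','t','i','o','n','-','8','.'],
   ['m','o','d','u','l','e','-','0','9','-','i','n','f','e','r','e','n','c','e','-','o','p','t','i','m','i','z','a','t','i','o','n','/','s','e','c','t','i','o','n','-','9','.']),
  (['m','o','d','u','l','e','-','1','0','-','l','l','m','-','a','p','i','s','/','s','e','c','t','i','o','n','-','9','.'],
   ['m','o','d','u','l','e','-','1','0','-','l','l','m','-','a','p','i','s','/','s','e','c','t','i','o','n','-','1','0','.']),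
  (['m','o','d','u','l','e','-','1','1','-','p','r','o','m','p','t','-','e','n','g','i','n','e','e','r','i','n','g','/','s','e','c','t','i','o','n','-','1','0','.'],
   ['m','o','d','u','l','e','-','1','1','-','p','r','o','m','p','t','-','e','n','g','i','n','e','e','r','i','n','g','/','s','e','c','t','i','o','n','-','1','1','.']),
  (['m','o','d','u','l','e','-','1','2','-','h','y','b','r','i','d','-','m','l','-','l','l','m','/','s','e','c','t','i','o','n','-','1','1','.'],
   ['m','o','d','u','l','e','-','1','2','-','h','y','b','r','i','d','-','m','l','-','l','l','m','/','s','e','c','t','i','o','n','-','1','2','.']),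
  (['m','o','d','u','l','e','-','1','3','-','s','y','n','t','h','e','t','i','c','-','d','a','t','a','/','s','e','c','t','i','o','n','-','1','2','.'],
   ['m','o','d','u','l','e','-','1','3','-','s','y','n','t','h','e','t','i','c','-','d','a','t','a','/','s','e','c','t','i','o','n','-','1','3','.']),
  (['m','o','d','u','l','e','-','1','4','-','f','i','n','e','-','t','u','n','i','n','g','-','f','u','n','d','a','m','e','n','t','a','l','s','/','s','e','c','t','i','o','n','-','1','3','.'],
   ['m','o','d','u','l','e','-','1','4','-','f','i','n','e','-','t','u','n','i','n','g','-','f','u','n','d','a','m','e','n','t','a','l','s','/','s','e','c','t','i','o','n','-','1','4','.']),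
  (['m','o','d','u','l','e','-','1','5','-','p','e','f','t','/','s','e','c','t','i','o','n','-','1','4','.'],
   ['m','o','d','u','l','e','-','1','5','-','p','e','f','t','/','s','e','c','t','i','o','n','-','1','5','.']),
  (['m','o','d','u','l','e','-','1','6','-','d','i','s','t','i','l','l','a','t','i','o','n','-','m','e','r','g','i','n','g','/','s','e','c','t','i','o','n','-','1','5','.'],
   ['m','o','d','u','l','e','-','1','6','-','d','i','s','t','i','l','l','a','t','i','o','n','-','m','e','r','g','i','n','g','/','s','e','c','t','i','o','n','-','1','6','.']),
  (['m','o','d','u','l','e','-','1','7','-','a','l','i','g','n','m','e','n','t','-','r','l','h','f','-','d','p','o','/','s','e','c','t','i','o','n','-','1','6','.'],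
   ['m','o','d','u','l','e','-','1','7','-','a','l','i','g','n','m','e','n','t','-','r','l','h','f','-','d','p','o','/','s','e','c','t','i','o','n','-','1','7','.']),
  (['m','o','d','u','l','e','-','1','8','-','i','n','t','e','r','p','r','e','t','a','b','i','l','i','t','y','/','s','e','c','t','i','o','n','-','1','7','.'],
   ['m','o','d','u','l','e','-','1','8','-','i','n','t','e','r','p','r','e','t','a','b','i','l','i','t','y','/','s','e','c','t','i','o','n','-','1','8','.']),
  (['m','o','d','u','l','e','-','1','9','-','e','m','b','e','d','d','i','n','g','s','-','v','e','c','t','o','r','-','d','b','/','s','e','c','t','i','o','n','-','1','8','.'],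
   ['m','o','d','u','l','e','-','1','9','-','e','m','b','e','d','d','i','n','g','s','-','v','e','c','t','o','r','-','d','b','/','s','e','c','t','i','o','n','-','1','9','.']),
  (['m','o','d','u','l','e','-','2','0','-','r','a','g','/','s','e','c','t','i','o','n','-','1','9','.'],
   ['m','o','d','u','l','e','-','2','0','-','r','a','g','/','s','e','c','t','i','o','n','-','2','0','.']),
  (['m','o','d','u','l','e','-','2','2','-','a','i','-','a','g','e','n','t','s','/','s','e','c','t','i','o','n','-','2','1','.'],
   ['m','o','d','u','l','e','-','2','2','-','a','i','-','a','g','e','n','t','s','/','s','e','c','t','i','o','n','-','2','2','.']),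
  (['m','o','d','u','l','e','-','2','4','-','m','u','l','t','i','-','a','g','e','n','t','-','s','y','s','t','e','m','s','/','s','e','c','t','i','o','n','-','2','3','.'],
   ['m','o','d','u','l','e','-','2','4','-','m','u','l','t','i','-','a','g','e','n','t','-','s','y','s','t','e','m','s','/','s','e','c','t','i','o','n','-','2','4','.']),
  (['m','o','d','u','l','e','-','2','9','-','e','v','a','l','u','a','t','i','o','n','-','o','b','s','e','r','v','a','b','i','l','i','t','y','/','s','e','c','t','i','o','n','-','2','5','.'],
   ['m','o','d','u','l','e','-','2','9','-','e','v','a','l','u','a','t','i','o','n','-','o','b','s','e','r','v','a','b','i','l','i','t','y','/','s','e','c','t','i','o','n','-','2','9','.']),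
  (['m','o','d','u','l','e','-','3','2','-','s','a','f','e','t','y','-','e','t','h','i','c','s','-','r','e','g','u','l','a','t','i','o','n','/','s','e','c','t','i','o','n','-','2','6','.'],
   ['m','o','d','u','l','e','-','3','2','-','s','a','f','e','t','y','-','e','t','h','i','c','s','-','r','e','g','u','l','a','t','i','o','n','/','s','e','c','t','i','o','n','-','3','2','.']),
  (['m','o','d','u','l','e','-','3','2','-','s','a','f','e','t','y','-','e','t','h','i','c','s','-','r','e','g','u','l','a','t','i','o','n','/','s','e','c','t','i','o','n','-','3','5','.'],
   ['m','o','d','u','l','e','-','3','2','-','s','a','f','e','t','y','-','e','t','h','i','c','s','-','r','e','g','u','l','a','t','i','o','n','/','s','e','c','t','i','o','n','-','3','2','.'])]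

def SECTION_RENUM : List (String × String) :=
  TBL.map (fun p => (String.ofList p.1, String.ofList p.2))

-- 'for old, new in SECTION_RENUM: n = content.count(old); if n > 0: content = content.replace(old, new); count += n'
def fix_category4 (content : String) : String × Int :=
  SECTION_RENUM.foldl
    (fun (st : String × Int) (p : String × String) =>
      let n : Int := (PySem.Str.count st.1 p.1 : Int)
      if n > 0 then (PySem.Str.replace st.1 p.1 p.2, st.2 + n) else st)
    (content, 0)

-- ===== PORT B =====
-- Source B's compact table _RENUM: (module name, old section number, new section number), as code points
def RENUM : List (List Char × List Char × List Char) := [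
  (['0','9','-','i','n','f','e','r','e','n','c','e','-','o','p','t','i','m','i','z','a','t','i','o','n'], ['8'], ['9']),
  (['1','0','-','l','l','m','-','a','p','i','s'], ['9'], ['1','0']),
  (['1','1','-','p','r','o','m','p','t','-','e','n','g','i','n','e','e','r','i','n','g'], ['1','0'], ['1','1']),
  (['1','2','-','h','y','b','r','i','d','-','m','l','-','l','l','m'], ['1','1'], ['1','2']),
  (['1','3','-','s','y','n','t','h','e','t','i','c','-','d','a','t','a'], ['1','2'], ['1','3']),
  (['1','4','-','f','i','n','e','-','t','u','n','i','n','g','-','f','u','n','d','a','m','e','n','t','a','l','s'], ['1','3'], ['1','4']),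
  (['1','5','-','p','e','f','t'], ['1','4'], ['1','5']),
  (['1','6','-','d','i','s','t','i','l','l','a','t','i','o','n','-','m','e','r','g','i','n','g'], ['1','5'], ['1','6']),
  (['1','7','-','a','l','i','g','n','m','e','n','t','-','r','l','h','f','-','d','p','o'], ['1','6'], ['1','7']),
  (['1','8','-','i','n','t','e','r','p','r','e','t','a','b','i','l','i','t','y'], ['1','7'], ['1','8']),
  (['1','9','-','e','m','b','e','d','d','i','n','g','s','-','v','e','c','t','o','r','-','d','b'], ['1','8'], ['1','9']),
  (['2','0','-','r','a','g'], ['1','9'], ['2','0']),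
  (['2','2','-','a','i','-','a','g','e','n','t','s'], ['2','1'], ['2','2']),
  (['2','4','-','m','u','l','t','i','-','a','g','e','n','t','-','s','y','s','t','e','m','s'], ['2','3'], ['2','4']),
  (['2','9','-','e','v','a','l','u','a','t','i','o','n','-','o','b','s','e','r','v','a','b','i','l','i','t','y'], ['2','5'], ['2','9']),
  (['3','2','-','s','a','f','e','t','y','-','e','t','h','i','c','s','-','r','e','g','u','l','a','t','i','o','n'], ['2','6'], ['3','2']),
  (['3','2','-','s','a','f','e','t','y','-','e','t','h','i','c','s','-','r','e','g','u','l','a','t','i','o','n'], ['3','5'], ['3','2'])]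

-- Source B's _pat: "module-" + m + "/section-" + s + "."
def mkPat (m s : List Char) : List Char :=
  ('m' :: 'o' :: 'd' :: 'u' :: 'l' :: 'e' :: '-' :: m) ++
  ('/' :: 's' :: 'e' :: 'c' :: 't' :: 'i' :: 'o' :: 'n' :: '-' :: s) ++ ['.']

-- Source B's 'table = [(_pat(m, a), _pat(m, b)) for m, a, b in _RENUM]'
def TBLB : List (List Char × List Char) :=
  RENUM.map (fun t => (mkPat t.1 t.2.1, mkPat t.1 t.2.2))

-- the inner 'for old, new in table: if content.startswith(old, i)' loop of Source B:
-- first table entry matching at the current position (= suffix content[i:])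
def firstMatch : List (List Char × List Char) → List Char → Option (List Char × List Char)
  | [], _ => none
  | (o, n) :: rest, cs => if o.isPrefixOf cs then some (o, n) else firstMatch rest cs

-- the 'while i < n' loop of Source B, ported as recursion over the remaining suffix content[i:]
-- (fuel = remaining length; each iteration consumes at least one character)
def scanGo (tbl : List (List Char × List Char)) : Nat → List Char → List Char × Int
  | 0, _ => ([], 0)
  | _ + 1, [] => ([], 0)
  | fuel + 1, c :: t =>
    match firstMatch tbl (c :: t) with
    | some (o, n) => let r := scanGo tbl fuel ((c :: t).drop o.length); (n ++ r.1, r.2 + 1)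
    | none => let r := scanGo tbl fuel t; (c :: r.1, r.2)

def fix_category4_alt (content : String) : String × Int :=
  let cs := content.toList
  let r := scanGo TBLB cs.length cs
  (String.ofList r.1, r.2)

-- ===== PRECONDITION & SPEC =====
def Spec_fix_category4 (content : String) (out : String × Int) : Prop := out = fix_category4_alt content
instance (content : String) (out : String × Int) : Decidable (Spec_fix_category4 content out) := by unfold Spec_fix_category4; infer_instance

-- ===== CLAIM (what is proved, stated in full; the proofs are below) =====
def Claim_equal_fix_category4 : Prop := ∀ (content : String), Dom_fix_category4 content → Spec_fix_category4 content (fix_category4 content)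

-- ===== LEMMAS AND PROOFS =====

-- B's compact triples generate exactly A's table
set_option maxRecDepth 100000 in
lemma TBLB_eq : TBLB = TBL := by decide

-- u and v disagree at some common index (so neither is a prefix of the other ++ anything)
def incompB (u v : List Char) : Bool := (u.zip v).any (fun p => p.1 != p.2)

-- f holds on every nonempty suffix of l
def allSufB (f : List Char → Bool) : List Char → Bool
  | [] => true
  | c :: t => f (c :: t) && allSufB f t

def MODL : List Char := ['m', 'o', 'd', 'u', 'l', 'e', '-']

-- the ground facts the equivalence rests on: every pattern/replacement starts with "module-",
-- "module-" does not re-occur inside any of them, and the full strings are pairwise incomparable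
def goodB (T : List (List Char × List Char)) : Bool :=
  T.all fun p =>
    (!p.1.isEmpty) && MODL.isPrefixOf p.1 && MODL.isPrefixOf p.2 &&
    (match p.1 with | [] => true | _ :: t => allSufB (fun u => incompB u MODL) t) &&
    (match p.2 with | [] => true | _ :: t => allSufB (fun u => incompB u MODL) t) &&
    T.all fun q => (p.1 == q.1 || incompB p.1 q.1) && incompB p.1 q.2

set_option maxRecDepth 100000 in
lemma good_table : goodB TBL = true := by decide

lemma incompB_iff {u v : List Char} :
    incompB u v = true ↔ ∃ i, ∃ (h1 : i < u.length) (h2 : i < v.length), u[i] ≠ v[i] := by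
  constructor
  · intro h
    rcases List.any_eq_true.mp h with ⟨x, hx, hne⟩
    rcases List.getElem_of_mem hx with ⟨i, hi, hxe⟩
    subst hxe
    simp only [List.getElem_zip, bne_iff_ne, ne_eq] at hne
    have hlen : (u.zip v).length = min u.length v.length := List.length_zip
    exact ⟨i, by omega, by omega, by simpa using hne⟩
  · rintro ⟨i, h1, h2, hne⟩
    apply List.any_eq_true.mpr
    have hi : i < (u.zip v).length := by
      simpa [List.length_zip] using (by omega : i < min u.length v.length)
    exact ⟨(u.zip v)[i], List.getElem_mem hi, by simpa [List.getElem_zip] using hne⟩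

lemma not_prefix_of_incompB {u v : List Char} (h : incompB u v = true) (z : List Char) :
    ¬ u <+: (v ++ z) := by
  rcases incompB_iff.mp h with ⟨i, h1, h2, hne⟩
  intro hpre
  have hg := hpre.getElem h1
  rw [List.getElem_append_left h2] at hg
  exact hne hg

lemma incompB_comm {u v : List Char} (h : incompB u v = true) : incompB v u = true := by
  rcases incompB_iff.mp h with ⟨i, h1, h2, hne⟩
  exact incompB_iff.mpr ⟨i, h2, h1, fun e => hne e.symm⟩

lemma allSufB_spec {f : List Char → Bool} : ∀ {l : List Char}, allSufB f l = true →
    ∀ q < l.length, f (l.drop q) = true := by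
  intro l
  induction l with
  | nil => intro _ q hq; simp at hq
  | cons c t ih =>
    intro h q hq
    rw [allSufB] at h
    simp only [Bool.and_eq_true] at h
    obtain ⟨h1, h2⟩ := h
    cases q with
    | zero => simpa using h1
    | succ q => exact ih h2 q (by simpa using hq)

-- extraction of the goodB facts about TBL
lemma good_unpack {o n : List Char} (hm : (o, n) ∈ TBL) :
    o ≠ [] ∧ MODL <+: o ∧ MODL <+: n ∧
    (∀ c t, o = c :: t → allSufB (fun u => incompB u MODL) t = true) ∧
    (∀ c t, n = c :: t → allSufB (fun u => incompB u MODL) t = true) ∧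
    ∀ o' n', (o', n') ∈ TBL → (o = o' ∨ incompB o o' = true) ∧ incompB o n' = true := by
  have h := good_table
  rw [goodB, List.all_eq_true] at h
  have h2 := h _ hm
  simp only [Bool.and_eq_true, List.all_eq_true, Bool.or_eq_true, beq_iff_eq,
    List.isPrefixOf_iff_prefix] at h2
  obtain ⟨⟨⟨⟨⟨ha, hb⟩, hc⟩, hd⟩, he⟩, hf⟩ := h2
  refine ⟨by simpa [List.isEmpty_iff] using ha, hb, hc, ?_, ?_, fun o' n' hm' => hf (o', n') hm'⟩
  · intro c t he'
    rw [he'] at hd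
    exact hd
  · intro c t he'
    rw [he'] at he
    exact he

lemma good_ne_nil {o n : List Char} (hm : (o, n) ∈ TBL) : o ≠ [] := (good_unpack hm).1

lemma good_mod_old {o n : List Char} (hm : (o, n) ∈ TBL) : MODL <+: o := (good_unpack hm).2.1

lemma good_mod_new {o n : List Char} (hm : (o, n) ∈ TBL) : MODL <+: n := (good_unpack hm).2.2.1

lemma good_suf_old {o n : List Char} (hm : (o, n) ∈ TBL) {q : Nat} (hq0 : 0 < q)
    (hq : q < o.length) : incompB (o.drop q) MODL = true := by
  have h := (good_unpack hm).2.2.2.1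
  cases o with
  | nil => simp at hq
  | cons c t =>
    cases q with
    | zero => omega
    | succ q =>
      simp only [List.drop_succ_cons]
      exact allSufB_spec (h c t rfl) q (by simpa using hq)

lemma good_suf_new {o n : List Char} (hm : (o, n) ∈ TBL) {p : Nat} (hp0 : 0 < p)
    (hp : p < n.length) : incompB (n.drop p) MODL = true := by
  have h := (good_unpack hm).2.2.2.2.1
  cases n with
  | nil => simp at hp
  | cons c t =>
    cases p with
    | zero => omega
    | succ p =>
      simp only [List.drop_succ_cons]
      exact allSufB_spec (h c t rfl) p (by simpa using hp)

lemma good_old_old {o n o' n' : List Char} (hm : (o, n) ∈ TBL) (hm' : (o', n') ∈ TBL)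
    (hne : o ≠ o') : incompB o o' = true := by
  rcases ((good_unpack hm).2.2.2.2.2 o' n' hm').1 with h | h
  · exact absurd h hne
  · exact h

lemma good_full_old_new {o n o' n' : List Char} (hm : (o, n) ∈ TBL) (hm' : (o', n') ∈ TBL) :
    incompB o n' = true := ((good_unpack hm).2.2.2.2.2 o' n' hm').2

-- a suffix that clashes with "module-" clashes with everything that starts with "module-"
lemma incompB_of_mod {u v : List Char} (h : incompB u MODL = true) (hv : MODL <+: v) :
    incompB u v = true := by
  rcases incompB_iff.mp h with ⟨i, h1, h2, hne⟩
  have hlen : MODL.length ≤ v.length := hv.length_le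
  have h2' : i < v.length := by omega
  exact incompB_iff.mpr ⟨i, h1, h2', fun hc => hne (hc.trans (hv.getElem h2).symm)⟩

-- every positive shift of a pattern clashes with every pattern
lemma good_old_drop {o n o' n' : List Char} (hm : (o, n) ∈ TBL) (hm' : (o', n') ∈ TBL)
    {q : Nat} (hq0 : 0 < q) (hq : q < o.length) : incompB (o.drop q) o' = true :=
  incompB_of_mod (good_suf_old hm hq0 hq) (good_mod_old hm')

-- every shift of a pattern clashes with every replacement
lemma good_old_new {o n o' n' : List Char} (hm : (o, n) ∈ TBL) (hm' : (o', n') ∈ TBL)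
    {q : Nat} (hq : q < o.length) : incompB (o.drop q) n' = true := by
  cases Nat.eq_zero_or_pos q with
  | inl h0 => subst h0; simpa using good_full_old_new hm hm'
  | inr hpos => exact incompB_of_mod (good_suf_old hm hpos hq) (good_mod_new hm')

-- every shift of a replacement clashes with every pattern
lemma good_new_old {o n o' n' : List Char} (hm : (o, n) ∈ TBL) (hm' : (o', n') ∈ TBL)
    {p : Nat} (hp : p < n.length) : incompB (n.drop p) o' = true := by
  cases Nat.eq_zero_or_pos p with
  | inl h0 => subst h0; simpa using incompB_comm (good_full_old_new hm' hm)
  | inr hpos => exact incompB_of_mod (good_suf_new hm hpos hp) (good_mod_old hm')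

-- ===== total (fuel-free) versions of the three loops, for the proofs =====

lemma firstMatch_cons (q : List Char × List Char) (rest : List (List Char × List Char))
    (cs : List Char) :
    firstMatch (q :: rest) cs = if q.1.isPrefixOf cs then some q else firstMatch rest cs := by
  cases q; rfl

lemma firstMatch_mem {tbl : List (List Char × List Char)} {cs : List Char}
    {p : List Char × List Char} (h : firstMatch tbl cs = some p) : p ∈ tbl := by
  induction tbl with
  | nil => simp [firstMatch] at h
  | cons q rest ih =>
    rw [firstMatch_cons] at h
    split at h
    · simp_all
    · exact List.mem_cons_of_mem _ (ih h)

lemma firstMatch_isPrefix {tbl : List (List Char × List Char)} {cs o n : List Char}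
    (h : firstMatch tbl cs = some (o, n)) : o <+: cs := by
  induction tbl with
  | nil => simp [firstMatch] at h
  | cons q rest ih =>
    rw [firstMatch_cons] at h
    split at h
    · rename_i hq; cases h; exact List.isPrefixOf_iff_prefix.mp hq
    · exact ih h

lemma firstMatch_none_iff {tbl : List (List Char × List Char)} {cs : List Char} :
    firstMatch tbl cs = none ↔ ∀ p ∈ tbl, ¬ p.1 <+: cs := by
  induction tbl with
  | nil => simp [firstMatch]
  | cons q rest ih =>
    rw [firstMatch_cons]
    split
    · rename_i hq
      simp only [reduceCtorEq, false_iff]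
      push Not
      exact ⟨q, List.mem_cons_self, List.isPrefixOf_iff_prefix.mp hq⟩
    · rename_i hq
      rw [ih]
      constructor
      · intro h p hp
        rcases List.mem_cons.mp hp with rfl | hp'
        · simpa [List.isPrefixOf_iff_prefix] using hq
        · exact h p hp'
      · intro h p hp; exact h p (List.mem_cons_of_mem _ hp)

def cntF (o : List Char) (ho : o ≠ []) : List Char → Nat
  | [] => 0
  | c :: t =>
    if o.isPrefixOf (c :: t) then cntF o ho ((c :: t).drop o.length) + 1
    else cntF o ho t
  termination_by l => l.length
  decreasing_by
  · have : 0 < o.length := List.length_pos_iff.mpr ho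
    simp [List.length_drop]; omega
  · simp

def repF (o n : List Char) (ho : o ≠ []) : List Char → List Char
  | [] => []
  | c :: t =>
    if o.isPrefixOf (c :: t) then n ++ repF o n ho ((c :: t).drop o.length)
    else c :: repF o n ho t
  termination_by l => l.length
  decreasing_by
  · have : 0 < o.length := List.length_pos_iff.mpr ho
    simp [List.length_drop]; omega
  · simp

def scanF (tbl : List (List Char × List Char)) (htbl : ∀ p ∈ tbl, p.1 ≠ []) :
    List Char → List Char × Int
  | [] => ([], 0)
  | c :: t =>
    match hm : firstMatch tbl (c :: t) with
    | some (o, n) =>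
      let r := scanF tbl htbl ((c :: t).drop o.length)
      (n ++ r.1, r.2 + 1)
    | none =>
      let r := scanF tbl htbl t
      (c :: r.1, r.2)
  termination_by l => l.length
  decreasing_by
  · have : 0 < o.length := List.length_pos_iff.mpr (htbl _ (firstMatch_mem hm))
    simp [List.length_drop]; omega
  · simp

lemma scanF_nil {tbl h} : scanF tbl h [] = ([], 0) := by rw [scanF]

lemma scanF_some {tbl h} {c : Char} {t o n : List Char}
    (hm : firstMatch tbl (c :: t) = some (o, n)) :
    scanF tbl h (c :: t) =
      (n ++ (scanF tbl h ((c :: t).drop o.length)).1,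
       (scanF tbl h ((c :: t).drop o.length)).2 + 1) := by
  rw [scanF, hm]

lemma scanF_none {tbl h} {c : Char} {t : List Char}
    (hm : firstMatch tbl (c :: t) = none) :
    scanF tbl h (c :: t) = (c :: (scanF tbl h t).1, (scanF tbl h t).2) := by
  rw [scanF, hm]

lemma scanF_some' {tbl h} {cs o n : List Char} (hcs : cs ≠ [])
    (hm : firstMatch tbl cs = some (o, n)) :
    scanF tbl h cs =
      (n ++ (scanF tbl h (cs.drop o.length)).1, (scanF tbl h (cs.drop o.length)).2 + 1) := by
  cases cs with
  | nil => exact absurd rfl hcs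
  | cons c t => exact scanF_some hm

-- the fuel recursion of port B computes scanF whenever the fuel covers the length
lemma scanGo_eq_scanF {tbl : List (List Char × List Char)} (h : ∀ p ∈ tbl, p.1 ≠ []) :
    ∀ (fuel : Nat) (l : List Char), l.length ≤ fuel → scanGo tbl fuel l = scanF tbl h l := by
  intro fuel
  induction fuel with
  | zero =>
    intro l hl
    rw [List.length_eq_zero_iff.mp (Nat.le_zero.mp hl)]
    rw [scanF_nil]; rfl
  | succ fuel ih =>
    intro l hl
    cases l with
    | nil => rw [scanF_nil]; rfl
    | cons c t =>
      cases hm : firstMatch tbl (c :: t) with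
      | some p =>
        obtain ⟨o, n⟩ := p
        have ho : 0 < o.length := List.length_pos_iff.mpr (h _ (firstMatch_mem hm))
        have hd : ((c :: t).drop o.length).length ≤ fuel := by
          simp only [List.length_drop]
          simp only [List.length_cons] at hl ⊢; omega
        rw [scanF_some hm]
        simp only [scanGo, hm]
        rw [ih _ hd]
      | none =>
        have ht : t.length ≤ fuel := by simpa using hl
        rw [scanF_none hm]
        simp only [scanGo, hm]
        rw [ih _ ht]

-- PySem's count/replace loops compute cntF/repF
lemma count_go_eq {o : List Char} (ho : o ≠ []) :
    ∀ (fuel : Nat) (l : List Char) (acc : Nat), l.length ≤ fuel →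
      PySem.Chars.count.go o fuel l acc = acc + cntF o ho l := by
  intro fuel
  induction fuel with
  | zero =>
    intro l acc hl
    rw [List.length_eq_zero_iff.mp (Nat.le_zero.mp hl)]
    simp [PySem.Chars.count.go, cntF]
  | succ fuel ih =>
    intro l acc hl
    cases l with
    | nil => simp [PySem.Chars.count.go, cntF]
    | cons c t =>
      have ho' : 0 < o.length := List.length_pos_iff.mpr ho
      rw [cntF]
      simp only [PySem.Chars.count.go]
      split
      · have hd : ((c :: t).drop o.length).length ≤ fuel := by
          simp only [List.length_drop]
          simp only [List.length_cons] at hl ⊢; omega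
        rw [ih _ _ hd]; omega
      · have ht : t.length ≤ fuel := by simpa using hl
        rw [ih _ _ ht]

lemma count_eq_cntF {o : List Char} (ho : o ≠ []) (l : List Char) :
    PySem.Chars.count l o = cntF o ho l := by
  rw [PySem.Chars.count]
  rw [if_neg (by simpa [List.isEmpty_iff] using ho)]
  simpa using count_go_eq ho l.length l 0 le_rfl

lemma replace_go_eq {o n : List Char} (ho : o ≠ []) :
    ∀ (fuel : Nat) (l acc : List Char), l.length ≤ fuel →
      PySem.Chars.replace.go o n fuel l acc = acc.reverse ++ repF o n ho l := by
  intro fuel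
  induction fuel with
  | zero =>
    intro l acc hl
    rw [List.length_eq_zero_iff.mp (Nat.le_zero.mp hl)]
    simp [PySem.Chars.replace.go, repF]
  | succ fuel ih =>
    intro l acc hl
    cases l with
    | nil => simp [PySem.Chars.replace.go, repF]
    | cons c t =>
      have ho' : 0 < o.length := List.length_pos_iff.mpr ho
      rw [repF]
      simp only [PySem.Chars.replace.go]
      split
      · have hd : ((c :: t).drop o.length).length ≤ fuel := by
          simp only [List.length_drop]
          simp only [List.length_cons] at hl ⊢; omega
        rw [ih _ _ hd]; simp
      · have ht : t.length ≤ fuel := by simpa using hl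
        rw [ih _ _ ht]; simp

lemma replace_eq_repF {o n : List Char} (ho : o ≠ []) (l : List Char) :
    PySem.Chars.replace l o n = repF o n ho l := by
  rw [PySem.Chars.replace]
  rw [if_neg (by simpa [List.isEmpty_iff] using ho)]
  simpa using replace_go_eq ho l.length l [] le_rfl

-- A's pass, on code-point lists
def passC (st : List Char × Int) (p : List Char × List Char) : List Char × Int :=
  let n : Int := (PySem.Chars.count st.1 p.1 : Int)
  if n > 0 then (PySem.Chars.replace st.1 p.1 p.2, st.2 + n) else st

-- the Python fold over strings is passC on the code points
lemma strfold_bridge :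
    ∀ (L : List (List Char × List Char)) (s : String) (k : Int),
      ((L.map (fun p => (String.ofList p.1, String.ofList p.2))).foldl
        (fun (st : String × Int) (p : String × String) =>
          let n : Int := (PySem.Str.count st.1 p.1 : Int)
          if n > 0 then (PySem.Str.replace st.1 p.1 p.2, st.2 + n) else st) (s, k)).1.toList
        = (L.foldl passC (s.toList, k)).1 ∧
      ((L.map (fun p => (String.ofList p.1, String.ofList p.2))).foldl
        (fun (st : String × Int) (p : String × String) =>
          let n : Int := (PySem.Str.count st.1 p.1 : Int)
          if n > 0 then (PySem.Str.replace st.1 p.1 p.2, st.2 + n) else st) (s, k)).2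
        = (L.foldl passC (s.toList, k)).2 := by
  intro L
  induction L with
  | nil => exact fun s k => ⟨rfl, rfl⟩
  | cons p L' ih =>
    intro s k
    obtain ⟨po, pn⟩ := p
    simp only [List.map_cons, List.foldl_cons]
    have hc : PySem.Str.count s (String.ofList po) = PySem.Chars.count s.toList po := by
      rw [PySem.Str.count_eq, String.toList_ofList]
    have h2 : passC (s.toList, k) (po, pn)
        = (if ((PySem.Chars.count s.toList po : Int) > 0)
           then (PySem.Chars.replace s.toList po pn, k + (PySem.Chars.count s.toList po : Int))
           else (s.toList, k)) := rfl
    rw [hc, h2]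
    by_cases hgt : ((PySem.Chars.count s.toList po : Int) > 0)
    · rw [if_pos hgt, if_pos hgt]
      have htl : (PySem.Str.replace s (String.ofList po) (String.ofList pn)).toList
          = PySem.Chars.replace s.toList po pn := by
        rw [PySem.Str.toList_replace, String.toList_ofList, String.toList_ofList]
      have := ih (PySem.Str.replace s (String.ofList po) (String.ofList pn))
        (k + (PySem.Chars.count s.toList po : Int))
      rwa [htl] at this
    · rw [if_neg hgt, if_neg hgt]
      exact ih s k

-- if a pattern never occurs, replacing it changes nothing
lemma repF_of_cnt_zero {o n : List Char} (ho : o ≠ []) :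
    ∀ {l : List Char}, cntF o ho l = 0 → repF o n ho l = l := by
  have key : ∀ (N : Nat) (l : List Char), l.length ≤ N →
      cntF o ho l = 0 → repF o n ho l = l := by
    intro N
    induction N with
    | zero =>
      intro l hl _
      rw [List.length_eq_zero_iff.mp (Nat.le_zero.mp hl)]
      rw [repF]
    | succ N ih =>
      intro l hl hz
      cases l with
      | nil => rw [repF]
      | cons c t =>
        rw [cntF] at hz
        rw [repF]
        split at hz
        · omega
        · rename_i hp
          rw [if_neg hp]
          have ht : t.length ≤ N := by simpa using hl
          rw [ih t ht hz]
  exact fun {l} => key l.length l le_rfl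

lemma passC_eq {o n : List Char} (ho : o ≠ []) (s : List Char) (k : Int) :
    passC (s, k) (o, n) = (repF o n ho s, k + (cntF o ho s : Int)) := by
  simp only [passC, count_eq_cntF ho, replace_eq_repF ho]
  by_cases hgt : ((cntF o ho s : Int) > 0)
  · rw [if_pos hgt]
  · rw [if_neg hgt]
    have hz : cntF o ho s = 0 := by omega
    rw [repF_of_cnt_zero ho hz, hz]
    simp

-- counts accumulate additively
lemma foldC_shift :
    ∀ (L : List (List Char × List Char)) (s : List Char) (k : Int),
      L.foldl passC (s, k) = ((L.foldl passC (s, 0)).1, k + (L.foldl passC (s, 0)).2) := by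
  intro L
  induction L with
  | nil => intro s k; simp
  | cons p L' ih =>
    intro s k
    have hsplit : passC (s, k) p = ((passC (s, 0) p).1, k + (passC (s, 0) p).2) := by
      obtain ⟨po, pn⟩ := p
      simp only [passC]
      split <;> simp
    rw [List.foldl_cons, List.foldl_cons, hsplit]
    rw [ih ((passC (s, 0) p).1) (k + (passC (s, 0) p).2)]
    have hrhs := ih ((passC (s, 0) p).1) ((passC (s, 0) p).2)
    rw [Prod.mk.eta] at hrhs
    rw [hrhs]
    simp only [Prod.mk.injEq]
    refine ⟨by trivial, by omega⟩

-- scanning a region no pattern can match into is transparent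
lemma scanF_append {L : List (List Char × List Char)} {h : ∀ p ∈ L, p.1 ≠ []} :
    ∀ (z y : List Char), (∀ p < z.length, ∀ q ∈ L, ¬ q.1 <+: (z.drop p ++ y)) →
      scanF L h (z ++ y) = (z ++ (scanF L h y).1, (scanF L h y).2) := by
  intro z
  induction z with
  | nil => intro y _; simp
  | cons c z' ih =>
    intro y H
    have h0 : ∀ q ∈ L, ¬ q.1 <+: (c :: (z' ++ y)) := by
      intro q hq
      have := H 0 (by simp) q hq
      simpa using this
    have hm : firstMatch L (c :: (z' ++ y)) = none := firstMatch_none_iff.mpr h0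
    have hstep : (c :: z') ++ y = c :: (z' ++ y) := rfl
    rw [hstep, scanF_none hm]
    have H' : ∀ p < z'.length, ∀ q ∈ L, ¬ q.1 <+: (z'.drop p ++ y) := by
      intro p hp q hq
      have := H (p + 1) (by simpa using Nat.succ_lt_succ hp) q hq
      simpa using this
    rw [ih y H']
    simp

-- replacing/counting through a region the pattern cannot match into is transparent
lemma repF_append {o n : List Char} (ho : o ≠ []) :
    ∀ (z y : List Char), (∀ p < z.length, ¬ o <+: (z.drop p ++ y)) →
      repF o n ho (z ++ y) = z ++ repF o n ho y ∧ cntF o ho (z ++ y) = cntF o ho y := by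
  intro z
  induction z with
  | nil => intro y _; exact ⟨rfl, rfl⟩
  | cons c z' ih =>
    intro y H
    have h0 : ¬ o <+: (c :: (z' ++ y)) := by
      have := H 0 (by simp)
      simpa using this
    have hnp : ¬ (o.isPrefixOf (c :: (z' ++ y)) = true) := by
      rw [List.isPrefixOf_iff_prefix]; exact h0
    have H' : ∀ p < z'.length, ¬ o <+: (z'.drop p ++ y) := by
      intro p hp
      have := H (p + 1) (by simpa using Nat.succ_lt_succ hp)
      simpa using this
    obtain ⟨ihr, ihc⟩ := ih y H'
    constructor
    · have hstep : (c :: z') ++ y = c :: (z' ++ y) := rfl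
      rw [hstep, repF, if_neg hnp, ihr]
      rfl
    · have hstep : (c :: z') ++ y = c :: (z' ++ y) := rfl
      rw [hstep, cntF, if_neg hnp, ihc]

-- replacing one table pattern never creates a match of any (suffix of a) table pattern
lemma noMatch_repF {o1 n1 : List Char} (ho1 : o1 ≠ []) (hm1 : (o1, n1) ∈ TBL) :
    ∀ (s : List Char) {o n : List Char}, (o, n) ∈ TBL → ∀ q, q < o.length →
      ¬ (o.drop q <+: s) → ¬ (o.drop q <+: repF o1 n1 ho1 s) := by
  have key : ∀ (N : Nat) (s : List Char), s.length ≤ N → ∀ {o n : List Char}, (o, n) ∈ TBL →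
      ∀ q, q < o.length → ¬ (o.drop q <+: s) → ¬ (o.drop q <+: repF o1 n1 ho1 s) := by
    intro N
    induction N with
    | zero =>
      intro s hl o n hm q hq hns
      rw [List.length_eq_zero_iff.mp (Nat.le_zero.mp hl)] at hns ⊢
      rw [repF]
      exact hns
    | succ N ih =>
      intro s hl o n hm q hq hns
      cases s with
      | nil => rw [repF]; exact hns
      | cons c t =>
        by_cases hp : (o1.isPrefixOf (c :: t) = true)
        · rw [repF, if_pos hp]
          exact not_prefix_of_incompB (good_old_new hm hm1 hq) _
        · rw [repF, if_neg hp]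
          intro hcon
          have hd : o.drop q = o[q] :: o.drop (q + 1) := List.drop_eq_getElem_cons hq
          rw [hd] at hcon hns
          obtain ⟨hc0, htail⟩ := List.cons_prefix_cons.mp hcon
          by_cases hq1 : q + 1 = o.length
          · have hde : o.drop (q + 1) = [] := by rw [hq1]; exact List.drop_length
            rw [hde] at hns
            apply hns
            rw [hc0]
            exact List.cons_prefix_cons.mpr ⟨rfl, List.nil_prefix⟩
          · have hq1' : q + 1 < o.length := by omega
            have hnt : ¬ (o.drop (q + 1) <+: t) := by
              intro h'
              apply hns
              exact List.cons_prefix_cons.mpr ⟨hc0, h'⟩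
            have ht : t.length ≤ N := by simpa using hl
            have := ih t ht hm (q + 1) hq1' hnt
            rw [List.drop_eq_getElem_cons hq1'] at this htail
            exact this htail
  exact fun s {o n} hm q hq hns => key s.length s le_rfl hm q hq hns

-- a matched pattern still heads the string after another pattern's pass
lemma firstMatch_stable {L : List (List Char × List Char)} (hL : ∀ p ∈ L, p ∈ TBL)
    {s oj nj : List Char} (hm : firstMatch L s = some (oj, nj)) (w : List Char) :
    firstMatch L (oj ++ w) = some (oj, nj) := by
  induction L with
  | nil => simp [firstMatch] at hm
  | cons p rest ih =>
    rw [firstMatch_cons] at hm ⊢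
    split at hm
    · rename_i hp
      cases hm
      rw [if_pos (List.isPrefixOf_iff_prefix.mpr (List.prefix_append _ _))]
    · rename_i hp
      have hmem : (oj, nj) ∈ TBL := hL _ (List.mem_cons_of_mem _ (firstMatch_mem hm))
      have hpmem : p ∈ TBL := hL _ List.mem_cons_self
      have hpne : p.1 ≠ oj := by
        intro he
        apply hp
        rw [List.isPrefixOf_iff_prefix, he]
        exact firstMatch_isPrefix hm
      have hinc : incompB p.1 oj = true := by
        obtain ⟨p1, p2⟩ := p
        exact good_old_old hpmem hmem hpne
      rw [if_neg (by rw [List.isPrefixOf_iff_prefix]; exact not_prefix_of_incompB hinc w)]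
      exact ih (fun q hq => hL _ (List.mem_cons_of_mem _ hq)) hm

lemma scanF_nil_tbl {h} : ∀ s : List Char, scanF [] h s = (s, 0) := by
  intro s
  induction s with
  | nil => exact scanF_nil
  | cons c t ih =>
    rw [scanF_none (by rfl), ih]

-- the heart: one pass of A followed by B's scan over the rest of the table = B's scan of the full table
lemma inner {o1 n1 : List Char} (ho1 : o1 ≠ []) (hm1 : (o1, n1) ∈ TBL)
    {L' : List (List Char × List Char)} (hL' : ∀ p ∈ L', p ∈ TBL)
    (hne : ∀ p ∈ ((o1, n1) :: L'), p.1 ≠ []) (hne' : ∀ p ∈ L', p.1 ≠ []) :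
    ∀ s : List Char,
      scanF ((o1, n1) :: L') hne s =
        ((scanF L' hne' (repF o1 n1 ho1 s)).1,
         (cntF o1 ho1 s : Int) + (scanF L' hne' (repF o1 n1 ho1 s)).2) := by
  have key : ∀ (N : Nat) (s : List Char), s.length ≤ N →
      scanF ((o1, n1) :: L') hne s =
        ((scanF L' hne' (repF o1 n1 ho1 s)).1,
         (cntF o1 ho1 s : Int) + (scanF L' hne' (repF o1 n1 ho1 s)).2) := by
    intro N
    induction N with
    | zero =>
      intro s hl
      rw [List.length_eq_zero_iff.mp (Nat.le_zero.mp hl)]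
      rw [repF, cntF, scanF_nil, scanF_nil]
      simp
    | succ N ih =>
      intro s hl
      cases s with
      | nil =>
        rw [repF, cntF, scanF_nil, scanF_nil]
        simp
      | cons c t =>
        by_cases hp : (o1.isPrefixOf (c :: t) = true)
        · -- the head pattern matches here
          have hpre : o1 <+: (c :: t) := List.isPrefixOf_iff_prefix.mp hp
          have hm : firstMatch ((o1, n1) :: L') (c :: t) = some (o1, n1) := by
            rw [firstMatch_cons, if_pos hp]
          have ho1l : 0 < o1.length := List.length_pos_iff.mpr ho1
          have hdl : ((c :: t).drop o1.length).length ≤ N := by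
            simp only [List.length_drop]
            simp only [List.length_cons] at hl ⊢; omega
          rw [scanF_some hm, repF, if_pos hp, cntF, if_pos hp]
          -- inertness of n1: nothing in the table matches into the copied n1 region
          have hinert : scanF L' hne' (n1 ++ repF o1 n1 ho1 ((c :: t).drop o1.length))
              = (n1 ++ (scanF L' hne' (repF o1 n1 ho1 ((c :: t).drop o1.length))).1,
                 (scanF L' hne' (repF o1 n1 ho1 ((c :: t).drop o1.length))).2) := by
            apply scanF_append
            intro p hplt q hq
            obtain ⟨qo, qn⟩ := q
            have hqmem : (qo, qn) ∈ TBL := hL' _ hq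
            show ¬ qo <+: _
            exact not_prefix_of_incompB (incompB_comm (good_new_old hm1 hqmem hplt)) _
          rw [hinert, ih _ hdl]
          simp only [Prod.mk.injEq]
          refine ⟨?_, ?_⟩ <;> first | trivial | (push_cast; ring)
        · cases hmm : firstMatch L' (c :: t) with
          | some pj =>
            obtain ⟨oj, nj⟩ := pj
            have hm : firstMatch ((o1, n1) :: L') (c :: t) = some (oj, nj) := by
              rw [firstMatch_cons, if_neg hp, hmm]
            have hjmem : (oj, nj) ∈ TBL := hL' _ (firstMatch_mem hmm)
            have hjpre : oj <+: (c :: t) := firstMatch_isPrefix hmm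
            have hoj : oj ≠ [] := good_ne_nil hjmem
            have hojl : 0 < oj.length := List.length_pos_iff.mpr hoj
            -- s = oj ++ rest
            obtain ⟨rest, hrest⟩ := hjpre
            have ho1ne : o1 ≠ oj := by
              intro he
              apply hp
              rw [List.isPrefixOf_iff_prefix, he]
              exact ⟨rest, hrest⟩
            -- the o1-pass walks straight through the oj region
            have Hwalk : ∀ p < oj.length, ¬ o1 <+: (oj.drop p ++ rest) := by
              intro p hplt
              cases Nat.eq_zero_or_pos p with
              | inl h0 =>
                subst h0
                simpa using not_prefix_of_incompB
                  (incompB_comm (good_old_old hjmem hm1 (fun he => ho1ne he.symm))) rest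
              | inr hpos =>
                exact not_prefix_of_incompB
                  (incompB_comm (good_old_drop hjmem hm1 hpos hplt)) rest
            have hWrest : repF o1 n1 ho1 (oj ++ rest) = oj ++ repF o1 n1 ho1 rest ∧
                cntF o1 ho1 (oj ++ rest) = cntF o1 ho1 rest := repF_append ho1 oj rest Hwalk
            have hrl : rest.length ≤ N := by
              have := congrArg List.length hrest
              simp only [List.length_append, List.length_cons] at this
              simp only [List.length_cons] at hl
              omega
            -- left side
            rw [scanF_some hm]
            have hdrop : (c :: t).drop oj.length = rest := by
              rw [← hrest]; exact List.drop_left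
            rw [hdrop]
            -- right side
            rw [← hrest, hWrest.1, hWrest.2]
            have hstable : firstMatch L' (oj ++ repF o1 n1 ho1 rest) = some (oj, nj) :=
              firstMatch_stable hL' hmm _
            have hdrop2 : (oj ++ repF o1 n1 ho1 rest).drop oj.length = repF o1 n1 ho1 rest :=
              List.drop_left
            have hne2 : oj ++ repF o1 n1 ho1 rest ≠ [] := by
              simp [hoj]
            rw [scanF_some' hne2 hstable, hdrop2, ih rest hrl]
            simp only [Prod.mk.injEq]
            refine ⟨?_, ?_⟩ <;> first | (push_cast; ring) | simp
          | none =>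
            have hm : firstMatch ((o1, n1) :: L') (c :: t) = none := by
              rw [firstMatch_cons, if_neg hp, hmm]
            rw [scanF_none hm]
            have hrep : repF o1 n1 ho1 (c :: t) = c :: repF o1 n1 ho1 t := by
              rw [repF, if_neg hp]
            have hcnt : cntF o1 ho1 (c :: t) = cntF o1 ho1 t := by
              rw [cntF, if_neg hp]
            rw [hrep, hcnt]
            -- no pattern matches the replaced remainder either
            have hnone : firstMatch L' (c :: repF o1 n1 ho1 t) = none := by
              apply firstMatch_none_iff.mpr
              intro q hq
              obtain ⟨qo, qn⟩ := q
              have hqmem : (qo, qn) ∈ TBL := hL' _ hq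
              have hqn : ¬ qo <+: (c :: t) := by
                have := firstMatch_none_iff.mp hmm (qo, qn) hq
                simpa using this
              have hq0 : 0 < qo.length := List.length_pos_iff.mpr (good_ne_nil hqmem)
              have := noMatch_repF ho1 hm1 (c :: t) hqmem 0 hq0 (by simpa using hqn)
              simp only [List.drop_zero] at this
              rw [hrep] at this
              exact this
            rw [scanF_none hnone]
            have ht : t.length ≤ N := by simpa using hl
            rw [ih t ht]
  exact fun s => key s.length s le_rfl

-- A's sequential passes equal B's one-pass scan, for any sub-table of TBL
lemma main_fold : ∀ (L : List (List Char × List Char)) (_hL : ∀ p ∈ L, p ∈ TBL)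
    (hne : ∀ p ∈ L, p.1 ≠ []) (s : List Char), L.foldl passC (s, 0) = scanF L hne s := by
  intro L
  induction L with
  | nil => intro _ _ s; rw [scanF_nil_tbl]; rfl
  | cons p L' ih =>
    intro hL hne s
    obtain ⟨o1, n1⟩ := p
    have hm1 : (o1, n1) ∈ TBL := hL _ List.mem_cons_self
    have ho1 : o1 ≠ [] := good_ne_nil hm1
    have hL'' : ∀ p ∈ L', p ∈ TBL := fun q hq => hL _ (List.mem_cons_of_mem _ hq)
    have hne' : ∀ p ∈ L', p.1 ≠ [] := fun q hq => hne _ (List.mem_cons_of_mem _ hq)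
    rw [List.foldl_cons, passC_eq ho1]
    simp only [zero_add]
    rw [foldC_shift L' (repF o1 n1 ho1 s) (cntF o1 ho1 s : Int)]
    rw [ih hL'' hne' (repF o1 n1 ho1 s)]
    exact (inner ho1 hm1 hL'' hne hne' s).symm

-- ===== VERDICT (by name: the statement is the Claim_ definition above) =====
theorem fix_category4_spec : Claim_equal_fix_category4 := by
  intro content _
  show fix_category4 content = fix_category4_alt content
  have hne : ∀ p ∈ TBL, p.1 ≠ [] := by
    intro p hp
    obtain ⟨o, n⟩ := p
    exact good_ne_nil hp
  obtain ⟨hbr1, hbr2⟩ := strfold_bridge TBL content 0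
  have hmain := main_fold TBL (fun p hp => hp) hne content.toList
  have halt : fix_category4_alt content
      = (String.ofList (scanF TBL hne content.toList).1, (scanF TBL hne content.toList).2) := by
    show (String.ofList (scanGo TBLB content.toList.length content.toList).1,
          (scanGo TBLB content.toList.length content.toList).2) = _
    rw [TBLB_eq, scanGo_eq_scanF hne _ _ le_rfl]
  rw [halt]
  have hA : fix_category4 content
      = (TBL.map (fun p => (String.ofList p.1, String.ofList p.2))).foldl
          (fun (st : String × Int) (p : String × String) =>
            let n : Int := (PySem.Str.count st.1 p.1 : Int)
            if n > 0 then (PySem.Str.replace st.1 p.1 p.2, st.2 + n) else st) (content, 0) := rfl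
  rw [hmain] at hbr1 hbr2
  apply Prod.ext
  · rw [hA]
    rw [← String.ofList_toList (s := ((TBL.map (fun p => (String.ofList p.1, String.ofList p.2))).foldl
          (fun (st : String × Int) (p : String × String) =>
            let n : Int := (PySem.Str.count st.1 p.1 : Int)
            if n > 0 then (PySem.Str.replace st.1 p.1 p.2, st.2 + n) else st) (content, 0)).1)]
    rw [hbr1]
  · rw [hA, hbr2]
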